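-- pv_equiv track=rewrite | github.com/VladimirVlasov/ftyers.github.io | 2018-komp-ling/practicals/practical4-response.alg/max_spanning_tree/max_spanning_tree.py | check_heads
-- ===== SOURCE A (Python) =====
-- def check_heads(graph_matrix):
--     heads = []
--     for node in range(len(graph_matrix)):
--         is_head = True
--         for current_node, current_node_connections in enumerate(graph_matrix):
--             if not current_node == node:
--                 if current_node_connections[node] != 0 :
--                     is_head = False
--         if is_head:
--             heads.append(node)
--     return heads
-- ===== SOURCE B (Python) =====
-- def check_heads(graph_matrix):
--     n = len(graph_matrix)
--     has_incoming = set()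
--     for current_node, row in enumerate(graph_matrix):
--         for j in range(n):
--             if j != current_node and row[j] != 0:
--                 has_incoming.add(j)
--     return [node for node in range(n) if node not in has_incoming]
-- ===== Notes on version B (the rewrite author's own statement) =====
-- stated objective: alternative
-- what changed: Instead of re-scanning the whole matrix once per candidate node, B marks every node with an incoming edge in a single pass into a set and then filters range(n) by set membership.
import Mathlib
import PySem

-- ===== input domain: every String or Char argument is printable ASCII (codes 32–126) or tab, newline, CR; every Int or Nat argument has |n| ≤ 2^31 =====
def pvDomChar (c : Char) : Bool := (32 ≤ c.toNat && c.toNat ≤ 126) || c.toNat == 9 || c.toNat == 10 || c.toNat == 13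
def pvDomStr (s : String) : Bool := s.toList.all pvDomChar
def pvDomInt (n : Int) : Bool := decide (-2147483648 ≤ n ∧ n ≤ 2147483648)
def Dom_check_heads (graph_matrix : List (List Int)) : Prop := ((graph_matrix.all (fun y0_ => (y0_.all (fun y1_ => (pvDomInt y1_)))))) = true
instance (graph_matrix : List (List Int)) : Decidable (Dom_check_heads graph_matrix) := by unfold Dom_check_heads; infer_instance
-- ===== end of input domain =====

-- B replaces A's per-candidate full-matrix rescan by one pass that collects all nodes
-- with an incoming edge into a set, then filters range(n) by membership (objective: alternative).

-- ===== PORT A =====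
-- row[node] is in range for every access under Pre_; pyGetD's default is never used there
def check_heads (graph_matrix : List (List Int)) : List Int :=
  (PySem.List.pyRange 0 graph_matrix.length 1).foldl (fun heads node =>
    let is_head := (PySem.List.enumerate graph_matrix).foldl
      (fun is_head p =>
        if !(p.1 == node) then
          (if PySem.List.pyGetD p.2 node 0 ≠ 0 then false else is_head)
        else is_head) true
    if is_head then heads ++ [node] else heads) []

-- ===== PORT B =====
def check_heads_alt (graph_matrix : List (List Int)) : List Int :=
  let n : Int := graph_matrix.length
  let has_incoming : PySem.Set Int := (PySem.List.enumerate graph_matrix).foldl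
    (fun s p => (PySem.List.pyRange 0 n 1).foldl
      (fun s j => if j ≠ p.1 ∧ PySem.List.pyGetD p.2 j 0 ≠ 0 then PySem.Set.add s j else s) s)
    PySem.Set.empty
  (PySem.List.pyRange 0 n 1).filter (fun node => !(PySem.Set.contains has_incoming node))

-- ===== PRECONDITION & SPEC =====
-- Exactly the inputs on which Python A returns: every row i must be indexable at every
-- column j < n with j ≠ i (otherwise A raises IndexError on row[node]).
def Pre_check_heads (graph_matrix : List (List Int)) : Prop :=
  ∀ p ∈ PySem.List.enumerate graph_matrix, ∀ j ∈ List.range graph_matrix.length,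
    (j : Int) ≠ p.1 → j < p.2.length
instance (graph_matrix : List (List Int)) : Decidable (Pre_check_heads graph_matrix) := by
  unfold Pre_check_heads; infer_instance
def pvWitness_check_heads : List (List Int) := [[0, 1], [0, 0]]
def Spec_check_heads (graph_matrix : List (List Int)) (out : List Int) : Prop := out = check_heads_alt graph_matrix
instance (graph_matrix : List (List Int)) (out : List Int) : Decidable (Spec_check_heads graph_matrix out) := by unfold Spec_check_heads; infer_instance

-- ===== CLAIM (what is proved, stated in full; the proofs are below) =====
def Claim_equal_check_heads : Prop := ∀ (graph_matrix : List (List Int)), Dom_check_heads graph_matrix → Pre_check_heads graph_matrix → Spec_check_heads graph_matrix (check_heads graph_matrix)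

-- ===== LEMMAS AND PROOFS =====

-- A's inner loop computes "no other row has a nonzero entry in column node"
theorem aInner (l : List (Int × List Int)) (node : Int) (b : Bool) :
    l.foldl (fun is_head p =>
        if !(p.1 == node) then
          (if PySem.List.pyGetD p.2 node 0 ≠ 0 then false else is_head)
        else is_head) b
      = (b && decide (∀ p ∈ l, p.1 ≠ node → PySem.List.pyGetD p.2 node 0 = 0)) := by
  induction l generalizing b with
  | nil => simp
  | cons x xs ih =>
    simp only [List.foldl_cons, ih]
    by_cases hx : x.1 = node
    · rw [if_neg (by simp [hx])]
      congr 1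
      rw [decide_eq_decide]
      simp [hx]
    · rw [if_pos (by simp [hx])]
      by_cases hv : PySem.List.pyGetD x.2 node 0 = 0
      · rw [if_neg (by simp [hv])]
        congr 1
        rw [decide_eq_decide]
        simp [hv]
      · rw [if_pos hv]
        simp [hx, hv]

-- membership after B's inner loop over one row
theorem bInner (l : List Int) (q : Int → Prop) [DecidablePred q] (s : PySem.Set Int) (x : Int) :
    (x ∈ l.foldl (fun s j => if q j then PySem.Set.add s j else s) s) ↔
      x ∈ s ∨ (x ∈ l ∧ q x) := by
  induction l generalizing s with
  | nil => simp
  | cons y ys ih =>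
    simp only [List.foldl_cons, List.mem_cons]
    by_cases hy : q y
    · simp only [if_pos hy, ih, PySem.Set.mem_add]
      constructor
      · rintro ((h | rfl) | h) <;> tauto
      · rintro (h | ⟨rfl | h, hq⟩) <;> tauto
    · simp only [if_neg hy, ih]
      constructor
      · rintro (h | h) <;> tauto
      · rintro (h | ⟨rfl | h, hq⟩) <;> tauto

-- membership in B's has_incoming set
theorem bOuter (L : List (Int × List Int)) (n : Int) (s : PySem.Set Int) (x : Int) :
    (x ∈ L.foldl
        (fun s p => (PySem.List.pyRange 0 n 1).foldl
          (fun s j => if j ≠ p.1 ∧ PySem.List.pyGetD p.2 j 0 ≠ 0 then PySem.Set.add s j else s) s)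
        s) ↔
      x ∈ s ∨ ∃ p ∈ L, x ∈ PySem.List.pyRange 0 n 1 ∧ x ≠ p.1 ∧ PySem.List.pyGetD p.2 x 0 ≠ 0 := by
  induction L generalizing s with
  | nil => simp
  | cons p ps ih =>
    simp only [List.foldl_cons, ih, bInner, List.mem_cons]
    constructor
    · rintro ((h | h) | ⟨q, hq, hr⟩)
      · exact Or.inl h
      · exact Or.inr ⟨p, Or.inl rfl, h.1, h.2⟩
      · exact Or.inr ⟨q, Or.inr hq, hr⟩
    · rintro (h | ⟨q, hq | hq, hr⟩)
      · exact Or.inl (Or.inl h)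
      · subst hq; exact Or.inl (Or.inr hr)
      · exact Or.inr ⟨q, hq, hr⟩

-- ===== VERDICT (by name: the statement is the Claim_ definition above) =====
theorem check_heads_spec : Claim_equal_check_heads := by
  intro g _ _
  unfold Spec_check_heads check_heads check_heads_alt
  rw [PySem.List.foldl_append_if_eq_filter]
  simp only [List.nil_append]
  apply List.filter_congr
  intro node hnode
  rw [aInner]
  simp only [Bool.true_and]
  set S : PySem.Set Int := (PySem.List.enumerate g).foldl
      (fun s p => (PySem.List.pyRange 0 (g.length : Int) 1).foldl
        (fun s j => if j ≠ p.1 ∧ PySem.List.pyGetD p.2 j 0 ≠ 0 then PySem.Set.add s j else s) s)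
      PySem.Set.empty with hS
  have hmem : node ∈ S ↔
      ¬ (∀ p ∈ PySem.List.enumerate g, p.1 ≠ node → PySem.List.pyGetD p.2 node 0 = 0) := by
    rw [hS, bOuter]
    push_neg
    constructor
    · rintro (h | ⟨p, hp, _, hne, hv⟩)
      · simp [PySem.Set.empty] at h
      · exact ⟨p, hp, Ne.symm hne, hv⟩
    · rintro ⟨p, hp, hne, hv⟩
      exact Or.inr ⟨p, hp, hnode, Ne.symm hne, hv⟩
  by_cases hin : node ∈ S
  · rw [(PySem.Set.contains_iff S node).mpr hin]
    have h := hmem.mp hin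
    push_neg at h
    obtain ⟨⟨a, bb⟩, hp, hne, hv⟩ := h
    simp only [Bool.not_true]
    have hd : decide (∀ p ∈ PySem.List.enumerate g, p.1 ≠ node → PySem.List.pyGetD p.2 node 0 = 0) = false := by
      rw [decide_eq_false_iff_not]
      intro hall
      exact hv (hall (a, bb) hp hne)
    rw [hd]
  · have hc : S.contains node = false := by
      cases h : S.contains node
      · rfl
      · exact absurd ((PySem.Set.contains_iff S node).mp h) hin
    have hall : ∀ p ∈ PySem.List.enumerate g, p.1 ≠ node → PySem.List.pyGetD p.2 node 0 = 0 := by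
      by_contra hno
      exact hin (hmem.mpr hno)
    rw [hc]
    simp only [Bool.not_false]
    exact decide_eq_true hall
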